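-- pv_equiv track=rewrite | github.com/robrhapsody/melodex-site | scripts/build_worship_song_verification_queue.py | simplified_tokens
-- ===== SOURCE A (Python) =====
-- def normalize_text(text: str | None) -> str:
--     if not text:
--         return ""
--     return " ".join(text.lower().split())
--
-- def simplify_token(token: str) -> str:
--     normalized = normalize_text(token)
--     if not normalized:
--         return ""
--     return normalized.split("/", 1)[0].strip()
--
-- def simplified_tokens(tokens: tuple[str, ...]) -> tuple[str, ...]:
--     result: list[str] = []
--     for token in tokens:
--         value = simplify_token(token)
--         if not value:
--             continue
--         if not result or result[-1] != value:
--             result.append(value)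
--     return tuple(result)
-- ===== SOURCE B (Python) =====
-- def normalize_text(text):
--     if not text:
--         return ""
--     return " ".join(text.lower().split())
--
--
-- def simplify_token(token):
--     normalized = normalize_text(token)
--     if not normalized:
--         return ""
--     return normalized.split("/", 1)[0].strip()
--
--
-- def simplified_tokens(tokens):
--     # Stage 1: simplify and drop empties.
--     cleaned = [v for v in (simplify_token(t) for t in tokens) if v]
--     # Stage 2: collapse each run of equal values by keeping the LAST element of
--     # every run: an element is kept exactly when it differs from its successor
--     # (None sentinel after the end). Since the members of a run are equal, the
--     # last of a run equals the first, so the result is the same sequence.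
--     successors = [*cleaned[1:], None]
--     return tuple(v for v, nxt in zip(cleaned, successors) if v != nxt)
-- ===== Notes on version B (the rewrite author's own statement) =====
-- stated objective: alternative
-- what changed: A fuses filtering and dedup in one accumulator loop that compares each value with the last APPENDED element; B first builds the cleaned list, then zips it with its own successor list and keeps exactly the elements that differ from their successor (i.e. the last element of each run instead of the first), with no accumulator.
import Mathlib
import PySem

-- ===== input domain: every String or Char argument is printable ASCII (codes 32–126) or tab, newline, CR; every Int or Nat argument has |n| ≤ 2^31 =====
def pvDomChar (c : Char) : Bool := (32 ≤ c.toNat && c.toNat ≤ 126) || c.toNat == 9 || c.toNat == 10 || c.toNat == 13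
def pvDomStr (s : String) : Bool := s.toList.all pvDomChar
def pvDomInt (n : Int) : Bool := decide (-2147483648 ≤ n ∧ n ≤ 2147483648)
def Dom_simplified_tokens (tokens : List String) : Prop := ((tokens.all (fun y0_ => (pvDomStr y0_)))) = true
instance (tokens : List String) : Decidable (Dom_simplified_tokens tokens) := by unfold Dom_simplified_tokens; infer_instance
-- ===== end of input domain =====

-- B replaces A's fused accumulator loop by two staged passes: build the cleaned list, then keep
-- exactly the elements differing from their successor (last of each run); alternative, same cost.

-- ===== PORT A =====
-- shared helpers (identical in Source A and Source B)
def normalize_text (text : String) : String :=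
  if text = "" then ""
  else PySem.Str.join " " (PySem.Str.split₀ (PySem.Str.lower text))

def simplify_token (token : String) : String :=
  let normalized := normalize_text token
  if normalized = "" then ""
  else
    let parts := (PySem.Str.splitMax? normalized "/" 1).getD []
    PySem.Str.strip (parts.headD "")

def simplified_tokens (tokens : List String) : List String :=
  tokens.foldl (fun result token =>
    let value := simplify_token token
    if value = "" then result
    else if result.isEmpty || (PySem.List.pyGet? result (-1) != some value) then
      result ++ [value]
    else result) []

-- ===== PORT B =====
-- Source B: cleaned list, its successor list (None sentinel at the end), keep the values that
-- differ from their successor, i.e. the last element of every run of equal values.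
def simplified_tokens_alt (tokens : List String) : List String :=
  let cleaned := (tokens.map simplify_token).filter (fun v => v ≠ "")
  let successors : List (Option String) := (cleaned.drop 1).map some ++ [none]
  ((cleaned.zip successors).filter (fun p => some p.1 ≠ p.2)).map Prod.fst

-- ===== PRECONDITION & SPEC =====
def Spec_simplified_tokens (tokens : List String) (out : List String) : Prop := out = simplified_tokens_alt tokens
instance (tokens : List String) (out : List String) : Decidable (Spec_simplified_tokens tokens out) := by unfold Spec_simplified_tokens; infer_instance

-- ===== CLAIM (what is proved, stated in full; the proofs are below) =====
def Claim_equal_simplified_tokens : Prop := ∀ (tokens : List String), Dom_simplified_tokens tokens → Spec_simplified_tokens tokens (simplified_tokens tokens)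

-- ===== LEMMAS AND PROOFS =====

-- named forms of A's loop body (proof-side only)
def pvStepD (result : List String) (value : String) : List String :=
  if result.isEmpty || (PySem.List.pyGet? result (-1) != some value) then result ++ [value]
  else result

def pvStepA (result : List String) (token : String) : List String :=
  let value := simplify_token token
  if value = "" then result else pvStepD result value

-- first-of-each-run collapse (what A computes on the cleaned list)
def pvCollapse : List String → List String
  | [] => []
  | x :: xs => x :: pvCollapse (xs.dropWhile (fun y => y == x))
termination_by l => l.length
decreasing_by
  exact Nat.lt_succ_of_le (List.length_dropWhile_le _ _)

-- last-of-each-run collapse (what B computes on the cleaned list)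
def pvKeepLast : List String → List String
  | [] => []
  | [x] => [x]
  | x :: y :: ys => if x = y then pvKeepLast (y :: ys) else x :: pvKeepLast (y :: ys)

theorem simplified_tokens_eq_foldA (tokens : List String) :
    simplified_tokens tokens = tokens.foldl pvStepA [] := rfl

-- state-passing view of the run-collapsing pass: `last?` is the last emitted element
def pvCollapseFrom (last? : Option String) : List String → List String
  | [] => []
  | x :: xs => if some x = last? then pvCollapseFrom last? xs else x :: pvCollapseFrom (some x) xs

theorem pvCollapseFrom_some (a : String) (xs : List String) :
    pvCollapseFrom (some a) xs = pvCollapse (xs.dropWhile (fun y => y == a)) := by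
  induction xs generalizing a with
  | nil => simp [pvCollapseFrom, pvCollapse]
  | cons y ys ih =>
    by_cases h : y = a
    · subst h
      simp [pvCollapseFrom, List.dropWhile, ih]
    · have hb : (y == a) = false := by simp [h]
      simp [pvCollapseFrom, List.dropWhile, h, hb, pvCollapse, ih]

theorem pvCollapseFrom_none (xs : List String) :
    pvCollapseFrom none xs = pvCollapse xs := by
  cases xs with
  | nil => simp [pvCollapseFrom, pvCollapse]
  | cons y ys => simp [pvCollapseFrom, pvCollapse, pvCollapseFrom_some]

theorem pyGet_last (acc : List String) (v : String) :
    PySem.List.pyGet? (acc ++ [v]) (-1) = some v := by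
  simp [PySem.List.pyGet?, PySem.List.pyIdx?]

theorem pyGet_neg_one_nil : PySem.List.pyGet? ([] : List String) (-1) = none := by
  decide

-- A's fold over the cleaned list equals the collapsing pass, for any accumulator
theorem foldl_stepD_eq (l : List String) (acc : List String) :
    l.foldl pvStepD acc = acc ++ pvCollapseFrom (PySem.List.pyGet? acc (-1)) l := by
  induction l generalizing acc with
  | nil => simp [pvCollapseFrom]
  | cons v vs ih =>
    simp only [List.foldl_cons]
    by_cases heq : PySem.List.pyGet? acc (-1) = some v
    · have hne : acc ≠ [] := by
        intro hnil; rw [hnil, pyGet_neg_one_nil] at heq; simp at heq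
      have hs : pvStepD acc v = acc := by
        simp [pvStepD, heq, List.isEmpty_iff, hne]
      rw [hs, ih acc]
      simp [pvCollapseFrom, heq]
    · have hs : pvStepD acc v = acc ++ [v] := by
        simp [pvStepD, heq]
      rw [hs, ih (acc ++ [v]), pyGet_last]
      simp [pvCollapseFrom]
      intro hc; exact absurd hc.symm heq

-- A's loop acts only on the nonempty simplified values
theorem foldA_eq (tokens : List String) (acc : List String) :
    tokens.foldl pvStepA acc
      = ((tokens.map simplify_token).filter (fun v => v ≠ "")).foldl pvStepD acc := by
  induction tokens generalizing acc with
  | nil => simp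
  | cons t ts ih =>
    simp only [List.foldl_cons, List.map_cons, List.filter_cons]
    by_cases h : simplify_token t = ""
    · have hs : pvStepA acc t = acc := by simp [pvStepA, h]
      rw [hs]
      have hf : (decide (simplify_token t ≠ "")) = false := by simp [h]
      rw [hf]
      simp only [Bool.false_eq_true, if_false]
      exact ih acc
    · have hs : pvStepA acc t = pvStepD acc (simplify_token t) := by simp [pvStepA, h]
      rw [hs]
      have ht : (decide (simplify_token t ≠ "")) = true := by simp [h]
      rw [ht]
      simp only [if_true]
      exact ih (pvStepD acc (simplify_token t))

-- keeping the last of each run yields the same list as keeping the first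
theorem pvKeepLast_eq_collapse (l : List String) : pvKeepLast l = pvCollapse l := by
  have key : ∀ l, ∀ x : String, pvKeepLast (x :: l) = x :: pvCollapse (l.dropWhile (fun y => y == x)) := by
    intro l
    induction l with
    | nil => intro x; simp [pvKeepLast, pvCollapse]
    | cons y ys ih =>
      intro x
      by_cases h : x = y
      · subst h
        have hb : (x == x) = true := by simp
        simp only [pvKeepLast, if_pos rfl, List.dropWhile, hb]
        exact ih x
      · have hb : (y == x) = false := by simp [Ne.symm h]
        simp only [pvKeepLast, if_neg h, List.dropWhile, hb]
        rw [ih y, pvCollapse]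
  cases l with
  | nil => simp [pvKeepLast, pvCollapse]
  | cons x xs => rw [key xs x, pvCollapse]

-- B's zip-with-successor pass computes pvKeepLast
theorem zip_succ_eq_keepLast (l : List String) :
    ((l.zip ((l.drop 1).map some ++ [none])).filter (fun p => some p.1 ≠ p.2)).map Prod.fst
      = pvKeepLast l := by
  induction l with
  | nil => simp [pvKeepLast]
  | cons x xs ih =>
    cases xs with
    | nil => simp [pvKeepLast, List.zip, List.filter]
    | cons y ys =>
      have hzip :
          ((x :: y :: ys).zip (((x :: y :: ys).drop 1).map some ++ [none]))
            = (x, some y) :: ((y :: ys).zip (((y :: ys).drop 1).map some ++ [none])) := by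
        simp [List.zip]
      rw [hzip]
      by_cases h : x = y
      · subst h
        simp only [List.filter_cons]
        have : (decide (some x ≠ some x)) = false := by simp
        rw [this]
        simp only [Bool.false_eq_true, if_false]
        rw [ih, pvKeepLast, if_pos rfl]
      · simp only [List.filter_cons]
        have : (decide (some x ≠ some y)) = true := by simp [h]
        rw [this]
        simp only [if_true, List.map_cons]
        rw [ih, pvKeepLast, if_neg h]

-- ===== VERDICT (by name: the statement is the Claim_ definition above) =====
theorem simplified_tokens_spec : Claim_equal_simplified_tokens := by
  intro tokens _
  show simplified_tokens tokens = simplified_tokens_alt tokens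
  rw [simplified_tokens_eq_foldA, foldA_eq, foldl_stepD_eq, pyGet_neg_one_nil,
    pvCollapseFrom_none, List.nil_append]
  show _ = simplified_tokens_alt tokens
  unfold simplified_tokens_alt
  rw [zip_succ_eq_keepLast, pvKeepLast_eq_collapse]
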